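-- pv_equiv track=rewrite | github.com/TulioCs/Desafio-Dito | questao2/main.py | get_customData
-- ===== SOURCE A (Python) =====
-- def get_customData(pos, customData):
--     '''
--     Description:
--     Function responsible for returning the transaction ID and the store where a product was purchased.
--     Use:
--       get_customData(param1, param2)
--
--     Parameters:
--         param1
--             position of the constomData list you want to extract the information
--         param2
--             list containing purchase information
--     '''
--     trasactionId = ""
--     storeName = ""
--     for x in range(len(customData[pos])):
--         if (customData[pos][x]['key'] == 'transaction_id'):
--             trasactionId = customData[pos][x]['value']
--         if (customData[pos][x]['key'] == 'store_name'):
--             storeName = customData[pos][x]['value']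
--     return(trasactionId, storeName)
-- ===== SOURCE B (Python) =====
-- def get_customData(pos, customData):
--     lookup = {item['key']: item for item in customData[pos]}
--     transactionId = lookup['transaction_id']['value'] if 'transaction_id' in lookup else ""
--     storeName = lookup['store_name']['value'] if 'store_name' in lookup else ""
--     return (transactionId, storeName)
-- ===== Notes on version B (the rewrite author's own statement) =====
-- stated objective: idiomatic
-- what changed: Replaces the indexed loop with per-item key comparisons by a one-pass dict comprehension keyed on each item's 'key' followed by two direct membership-guarded lookups.
import Mathlib
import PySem

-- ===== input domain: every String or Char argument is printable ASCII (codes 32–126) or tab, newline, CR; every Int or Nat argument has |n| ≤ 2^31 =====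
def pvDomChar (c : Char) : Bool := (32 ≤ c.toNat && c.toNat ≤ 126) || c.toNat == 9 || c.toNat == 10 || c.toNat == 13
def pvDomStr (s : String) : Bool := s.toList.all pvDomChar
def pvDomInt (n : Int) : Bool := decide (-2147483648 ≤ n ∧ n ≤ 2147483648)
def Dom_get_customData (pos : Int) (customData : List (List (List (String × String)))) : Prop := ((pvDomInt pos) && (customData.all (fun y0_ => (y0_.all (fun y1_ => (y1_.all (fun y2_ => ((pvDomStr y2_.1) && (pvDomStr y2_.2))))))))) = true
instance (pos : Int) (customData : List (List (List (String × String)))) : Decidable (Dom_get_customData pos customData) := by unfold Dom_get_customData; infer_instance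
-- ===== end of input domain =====

-- B replaces the indexed loop with per-item comparisons by a dict built in one pass and two guarded lookups (idiomatic; return value only).

-- ===== PORT A =====
-- the loop body: update both accumulator components from one item (a Python dict = assoc list)
def pvStepA (acc : String × String) (item : List (String × String)) : String × String :=
  let acc1 := if (PySem.Dict.mk item).get? "key" = some "transaction_id" then
      (((PySem.Dict.mk item).get? "value").getD "", acc.2) else acc
  if (PySem.Dict.mk item).get? "key" = some "store_name" then
      (acc1.1, ((PySem.Dict.mk item).get? "value").getD "") else acc1

def get_customData (pos : Int) (customData : List (List (List (String × String)))) : String × String :=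
  let row := (PySem.List.pyGet? customData pos).getD []
  (PySem.List.pyRange 0 (row.length : Int) 1).foldl
    (fun acc x => pvStepA acc (PySem.List.pyGetD row x [])) ("", "")

-- ===== PORT B =====
-- extract the guarded lookup:  lookup[k]['value'] if k in lookup else ""
def pvExtract (d : PySem.Dict String (List (String × String))) (k : String) : String :=
  match d.get? k with
  | some item => ((PySem.Dict.mk item).get? "value").getD ""
  | none => ""

def get_customData_alt (pos : Int) (customData : List (List (List (String × String)))) : String × String :=
  let row := (PySem.List.pyGet? customData pos).getD []
  let lookup := row.foldl
    (fun d item => d.insert (((PySem.Dict.mk item).get? "key").getD "") item) PySem.Dict.empty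
  (pvExtract lookup "transaction_id", pvExtract lookup "store_name")

-- ===== PRECONDITION & SPEC =====
-- Pre_ excludes exactly the inputs where Python A raises: pos out of range (IndexError),
-- an item without 'key', or a 'transaction_id'/'store_name' item without 'value' (KeyError).
def Pre_get_customData (pos : Int) (customData : List (List (List (String × String)))) : Prop :=
  PySem.Raise.InRange customData.length pos ∧
  ∀ item ∈ (PySem.List.pyGet? customData pos).getD [],
    (PySem.Dict.mk item).contains "key" = true ∧
    (((PySem.Dict.mk item).get? "key" = some "transaction_id" ∨
      (PySem.Dict.mk item).get? "key" = some "store_name") →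
      (PySem.Dict.mk item).contains "value" = true)
instance (pos : Int) (customData : List (List (List (String × String)))) : Decidable (Pre_get_customData pos customData) := by unfold Pre_get_customData; infer_instance

def pvWitness_get_customData : Int × (List (List (List (String × String)))) :=
  (0, [[[("key", "transaction_id"), ("value", "t1")], [("key", "store_name"), ("value", "s1")]]])

def Spec_get_customData (pos : Int) (customData : List (List (List (String × String)))) (out : String × String) : Prop := out = get_customData_alt pos customData
instance (pos : Int) (customData : List (List (List (String × String)))) (out : String × String) : Decidable (Spec_get_customData pos customData out) := by unfold Spec_get_customData; infer_instance

-- ===== CLAIM (what is proved, stated in full; the proofs are below) =====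
def Claim_equal_get_customData : Prop := ∀ (pos : Int) (customData : List (List (List (String × String)))), Dom_get_customData pos customData → Pre_get_customData pos customData → Spec_get_customData pos customData (get_customData pos customData)

-- ===== LEMMAS AND PROOFS =====

-- one step of A's fold matches one insert into B's dict, seen through pvExtract
theorem pvStep_insert (d : PySem.Dict String (List (String × String)))
    (item : List (String × String)) :
    pvStepA (pvExtract d "transaction_id", pvExtract d "store_name") item =
      (pvExtract (d.insert (((PySem.Dict.mk item).get? "key").getD "") item) "transaction_id",
       pvExtract (d.insert (((PySem.Dict.mk item).get? "key").getD "") item) "store_name") := by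
  cases hk : (PySem.Dict.mk item).get? "key" with
  | none =>
      simp [pvStepA, pvExtract, hk, PySem.Dict.get?_insert]
  | some k =>
      by_cases h1 : k = "transaction_id"
      · subst h1
        simp [pvStepA, pvExtract, hk, PySem.Dict.get?_insert]
      · by_cases h2 : k = "store_name"
        · subst h2
          simp [pvStepA, pvExtract, hk, PySem.Dict.get?_insert]
        · simp [pvStepA, pvExtract, hk, PySem.Dict.get?_insert, h1, h2, Ne.symm h1, Ne.symm h2]

-- the loop invariant, by induction over the row with a generalized dict
theorem pvFold_eq (row : List (List (String × String)))
    (d : PySem.Dict String (List (String × String))) :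
    row.foldl pvStepA (pvExtract d "transaction_id", pvExtract d "store_name") =
      (pvExtract (row.foldl (fun d item =>
          d.insert (((PySem.Dict.mk item).get? "key").getD "") item) d) "transaction_id",
       pvExtract (row.foldl (fun d item =>
          d.insert (((PySem.Dict.mk item).get? "key").getD "") item) d) "store_name") := by
  induction row generalizing d with
  | nil => rfl
  | cons item rest ih =>
      simp only [List.foldl_cons, pvStep_insert]
      exact ih _

-- ===== VERDICT (by name: the statement is the Claim_ definition above) =====
theorem get_customData_spec : Claim_equal_get_customData := by
  intro pos customData _ _
  unfold Spec_get_customData get_customData get_customData_alt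
  rw [PySem.List.foldl_pyRange_zero_pyGetD' _ _ pvStepA ("", "")]
  have h := pvFold_eq ((PySem.List.pyGet? customData pos).getD []) PySem.Dict.empty
  simpa [pvExtract] using h
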